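-- pv_equiv track=rewrite | github.com/johntsi/preast_qa | general_modules/preprocess_ms_marco.py | clean_repeating_tokens
-- ===== SOURCE A (Python) =====
-- def clean_repeating_tokens(repeating_tokens, tokens):
-- 	"""
-- 	Reduces long sequences of repeating tokens (?????????????? --> ?)
--
-- 	Args:
-- 		repeating_tokens: str
-- 		tokens: list[str]
-- 	Returns:
-- 		tokens: list[str]
-- 	"""
--
-- 	# find the span of the repeating tokens
-- 	spans = []
-- 	pos_end = -1
-- 	for pos_start, t_start in enumerate(tokens):
-- 		if pos_start <= pos_end:
-- 			continue
-- 		if t_start == repeating_tokens: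
-- 			last_pos = len(tokens[pos_start:]) - 1
-- 			for j, t_end in enumerate(tokens[pos_start:]):
-- 				if t_end != repeating_tokens:
-- 					pos_end = pos_start + j
-- 					break
-- 				if j == last_pos:
-- 					pos_end = pos_start + j + 1
-- 			spans.append((pos_start, pos_end))
--
--
-- 	if repeating_tokens == "_" or repeating_tokens == ".":
-- 		num = 3
-- 	else:
-- 		num = 1
--
-- 	correction = 0
-- 	for span in spans:
-- 		start, end = span
-- 		start -= correction
-- 		end -= correction
-- 		span_length = end - start
-- 		if span_length > num:
-- 			tokens[start: end] = [repeating_tokens] * num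
-- 			correction += span_length - num
--
-- 	return tokens
-- ===== SOURCE B (Python) =====
-- def clean_repeating_tokens(repeating_tokens, tokens):
--     """Single forward pass with a run counter: emit each token, but at most
--     num consecutive copies of repeating_tokens. Writes back in place."""
--     num = 3 if repeating_tokens in ("_", ".") else 1
--     result = []
--     count = 0
--     for t in tokens:
--         if t == repeating_tokens:
--             count += 1
--             if count <= num:
--                 result.append(t)
--         else:
--             count = 0
--             result.append(t)
--     tokens[:] = result
--     return tokens
-- ===== Notes on version B (the rewrite author's own statement) =====
-- stated objective: simpler
-- what changed: Replaces A's three phases (span discovery with an inner rescan per run, then slice-assignment splicing with a running index correction) by one forward pass with a run counter that emits at most num consecutive copies directly.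
import Mathlib
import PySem

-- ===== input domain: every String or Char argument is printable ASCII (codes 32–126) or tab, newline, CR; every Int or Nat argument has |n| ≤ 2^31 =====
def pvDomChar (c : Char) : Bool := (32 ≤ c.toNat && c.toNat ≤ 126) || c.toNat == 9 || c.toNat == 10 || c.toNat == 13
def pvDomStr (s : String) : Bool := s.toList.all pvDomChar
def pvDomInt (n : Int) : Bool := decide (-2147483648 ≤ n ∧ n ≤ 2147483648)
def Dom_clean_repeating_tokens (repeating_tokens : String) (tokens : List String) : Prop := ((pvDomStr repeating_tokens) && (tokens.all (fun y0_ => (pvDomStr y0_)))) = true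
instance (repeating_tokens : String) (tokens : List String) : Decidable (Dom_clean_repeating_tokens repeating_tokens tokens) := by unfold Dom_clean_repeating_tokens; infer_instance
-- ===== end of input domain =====

-- B replaces A's span discovery + slice-assignment splicing by ONE forward pass with a run
-- counter (objective: simpler). Both A and B mutate `tokens` in place in Python the same way
-- (tokens[start:end] = … resp. tokens[:] = …); the theorems below are about the return value.

-- ===== PORT A =====
-- inner loop `for j, t_end in enumerate(tokens[pos_start:]): …` with its break
def pvInner (rt : String) (pos_start last_pos : Int) : List (Int × String) → Int → Int
  | [], pe => pe
  | (j, t) :: rest, pe =>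
    if t ≠ rt then pos_start + j          -- pos_end = pos_start + j; break
    else if j = last_pos then pvInner rt pos_start last_pos rest (pos_start + j + 1)
    else pvInner rt pos_start last_pos rest pe

-- outer loop `for pos_start, t_start in enumerate(tokens): …` building `spans`
def pvOuter (rt : String) (tokens : List String) : List (Int × String) → Int → List (Int × Int) → List (Int × Int)
  | [], _, spans => spans
  | (ps, t) :: rest, pe, spans =>
    if ps ≤ pe then pvOuter rt tokens rest pe spans
    else if t = rt then
      let suffix := PySem.List.slice tokens (some ps) none
      let last_pos : Int := (suffix.length : Int) - 1
      let pe' := pvInner rt ps last_pos (PySem.List.enumerate suffix) pe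
      pvOuter rt tokens rest pe' (spans ++ [(ps, pe')])
    else pvOuter rt tokens rest pe spans

-- `for span in spans: … tokens[start:end] = [repeating_tokens]*num …`
-- (the slice assignment is ported as take ++ replicate ++ drop; exact here since every
--  reached span satisfies 0 ≤ start ≤ end ≤ len(tokens))
def pvSplice (rt : String) (num : Int) : List (Int × Int) → List String → Int → List String
  | [], toks, _ => toks
  | (s, e) :: rest, toks, corr =>
    let start := s - corr
    let e' := e - corr
    let span_length := e' - start
    if span_length > num then
      pvSplice rt num rest
        (PySem.List.slice toks none (some start) ++ List.replicate num.toNat rt ++ PySem.List.slice toks (some e') none)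
        (corr + (span_length - num))
    else pvSplice rt num rest toks corr

def clean_repeating_tokens (repeating_tokens : String) (tokens : List String) : List String :=
  let spans := pvOuter repeating_tokens tokens (PySem.List.enumerate tokens) (-1) []
  let num : Int := if repeating_tokens = "_" ∨ repeating_tokens = "." then 3 else 1
  pvSplice repeating_tokens num spans tokens 0

-- ===== PORT B =====
-- one forward pass with a run counter, appending only while count ≤ num
def altGo (rt : String) (num : Int) : List String → Int → List String
  | [], _ => []
  | t :: rest, count =>
    if t = rt then
      if count + 1 ≤ num then t :: altGo rt num rest (count + 1)
      else altGo rt num rest (count + 1)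
    else t :: altGo rt num rest 0

def clean_repeating_tokens_alt (repeating_tokens : String) (tokens : List String) : List String :=
  let num : Int := if repeating_tokens = "_" ∨ repeating_tokens = "." then 3 else 1
  altGo repeating_tokens num tokens 0

-- ===== PRECONDITION & SPEC =====
def Spec_clean_repeating_tokens (repeating_tokens : String) (tokens : List String) (out : List String) : Prop := out = clean_repeating_tokens_alt repeating_tokens tokens
instance (repeating_tokens : String) (tokens : List String) (out : List String) : Decidable (Spec_clean_repeating_tokens repeating_tokens tokens out) := by unfold Spec_clean_repeating_tokens; infer_instance

-- ===== CLAIM (what is proved, stated in full; the proofs are below) =====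
def Claim_equal_clean_repeating_tokens : Prop := ∀ (repeating_tokens : String) (tokens : List String), Dom_clean_repeating_tokens repeating_tokens tokens → Spec_clean_repeating_tokens repeating_tokens tokens (clean_repeating_tokens repeating_tokens tokens)

-- ===== LEMMAS AND PROOFS =====

-- length of the leading run of rt
def pvCnt (rt : String) : List String → Nat
  | [] => 0
  | t :: r => if t = rt then pvCnt rt r + 1 else 0

theorem take_pvCnt (rt : String) (xs : List String) :
    xs.take (pvCnt rt xs) = List.replicate (pvCnt rt xs) rt := by
  induction xs with
  | nil => simp [pvCnt]
  | cons t r ih =>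
    by_cases h : t = rt
    · simp [pvCnt, h, List.replicate_succ, ih]
    · simp [pvCnt, h]

theorem drop_pvCnt_ne (rt : String) (xs : List String) (u : String) (v : List String)
    (h : xs.drop (pvCnt rt xs) = u :: v) : u ≠ rt := by
  induction xs with
  | nil => simp [pvCnt] at h
  | cons t r ih =>
    by_cases ht : t = rt
    · simp only [pvCnt, if_pos ht, List.drop_succ_cons] at h
      exact ih h
    · simp only [pvCnt, if_neg ht, List.drop_zero] at h
      cases h; exact ht

-- the spans A's first phase computes, expressed run-by-run
def pvSpans (rt : String) (i : Int) : List String → List (Int × Int)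
  | [] => []
  | t :: r =>
    if t = rt then
      (i, i + (pvCnt rt r : Int) + 1) :: pvSpans rt (i + (pvCnt rt r : Int) + 2) (r.drop (pvCnt rt r + 1))
    else pvSpans rt (i + 1) r
  termination_by xs => xs.length
  decreasing_by all_goals (simp [List.length_drop]; try omega)

-- the common run-collapsing specification
def pvCollapse (rt : String) (num : Nat) : List String → List String
  | [] => []
  | t :: r =>
    if t = rt then
      List.replicate (min (pvCnt rt r + 1) num) rt ++ pvCollapse rt num (r.drop (pvCnt rt r))
    else t :: pvCollapse rt num r
  termination_by xs => xs.length
  decreasing_by all_goals (simp [List.length_drop]; try omega)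

-- A's inner loop returns pos_start + j + (length of the leading run of the scanned suffix)
theorem pvInner_eq (rt : String) (s : Int) :
    ∀ (ys : List String) (j pe : Int),
    pvInner rt s (j + (ys.length : Int) - 1) (PySem.List.enumerate ys j) pe
      = if ys = [] then pe else s + j + (pvCnt rt ys : Int) := by
  intro ys
  induction ys with
  | nil => intro j pe; simp [PySem.List.enumerate_nil, pvInner]
  | cons y w ih =>
    intro j pe
    rw [PySem.List.enumerate_cons, if_neg (List.cons_ne_nil y w)]
    by_cases hy : y = rt
    · subst hy
      by_cases hw : w = []
      · subst hw
        simp [pvInner, pvCnt]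
      · have hw1 : 1 ≤ w.length := List.length_pos_iff.mpr hw
        have hne : ¬ (j = j + ((y :: w).length : Int) - 1) := by
          simp only [List.length_cons]; push_cast; omega
        simp only [pvInner, ne_eq, not_true_eq_false, if_false, if_neg hne]
        have hlp : j + ((y :: w).length : Int) - 1 = (j + 1) + (w.length : Int) - 1 := by
          simp only [List.length_cons]; push_cast; omega
        rw [hlp, ih (j + 1) pe, if_neg hw]
        simp only [pvCnt]
        push_cast
        omega
    · simp [pvInner, hy, pvCnt]

-- skipping: positions ≤ pos_end are passed over
theorem pvOuter_skip (rt : String) (tokens : List String) (d : Nat) :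
    ∀ (ys : List String) (j pe : Int) (sp : List (Int × Int)), j + (d : Int) ≤ pe + 1 →
    pvOuter rt tokens (PySem.List.enumerate ys j) pe sp
      = pvOuter rt tokens (PySem.List.enumerate (ys.drop d) (j + (d : Int))) pe sp := by
  induction d with
  | zero => intro ys j pe sp _; simp
  | succ d ih =>
    intro ys j pe sp h
    cases ys with
    | nil => simp [PySem.List.enumerate_nil, pvOuter]
    | cons y w =>
      rw [PySem.List.enumerate_cons]
      have hskip : j ≤ pe := by push_cast at h; omega
      simp only [pvOuter, if_pos hskip]
      rw [ih w (j + 1) pe sp (by push_cast at h ⊢; omega)]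
      have e1 : (y :: w).drop (d + 1) = w.drop d := rfl
      have e2 : j + ((d + 1 : Nat) : Int) = j + 1 + (d : Int) := by push_cast; omega
      rw [e1, e2]

-- A's first phase computes exactly pvSpans
theorem pvOuter_eq (rt : String) (tokens : List String) :
    ∀ (n : Nat) (xs : List String), xs.length ≤ n → ∀ (i pe : Int) (spans : List (Int × Int)),
    0 ≤ i → pe < i → tokens.drop i.toNat = xs →
    pvOuter rt tokens (PySem.List.enumerate xs i) pe spans = spans ++ pvSpans rt i xs := by
  intro n
  induction n with
  | zero =>
    intro xs hlen i pe spans _ _ _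
    have : xs = [] := List.eq_nil_of_length_eq_zero (by omega)
    subst this
    simp [PySem.List.enumerate_nil, pvOuter, pvSpans]
  | succ n ih =>
    intro xs hlen i pe spans hi hpe hdrop
    cases xs with
    | nil => simp [PySem.List.enumerate_nil, pvOuter, pvSpans]
    | cons t r =>
      rw [PySem.List.enumerate_cons]
      have hnoskip : ¬ i ≤ pe := by omega
      by_cases ht : t = rt
      · have hsuffix : PySem.List.slice tokens (some i) none = t :: r := by
          rw [PySem.List.slice_from tokens hi, hdrop]
        simp only [pvOuter, if_neg hnoskip, if_pos ht, hsuffix]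
        have hlp : ((t :: r).length : Int) - 1 = 0 + ((t :: r).length : Int) - 1 := by omega
        rw [show PySem.List.enumerate (t :: r) = PySem.List.enumerate (t :: r) 0 from rfl,
            hlp, pvInner_eq rt i (t :: r) 0 pe, if_neg (List.cons_ne_nil t r)]
        have hcnt : pvCnt rt (t :: r) = pvCnt rt r + 1 := by simp [pvCnt, ht]
        set c : Nat := pvCnt rt r with hc
        have hpe' : i + 0 + (pvCnt rt (t :: r) : Int) = i + (c : Int) + 1 := by
          rw [hcnt]; push_cast; omega
        rw [hpe', pvOuter_skip rt tokens (c + 1) r (i + 1) (i + (c : Int) + 1) _ (by push_cast; omega)]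
        have harg : i + 1 + ((c + 1 : Nat) : Int) = i + (c : Int) + 2 := by push_cast; omega
        rw [harg]
        have hdrop2 : tokens.drop (i + (c : Int) + 2).toNat = r.drop (c + 1) := by
          have h1 : (i + (c : Int) + 2).toNat = i.toNat + (c + 2) := by omega
          rw [h1, ← List.drop_drop, hdrop]
          simp
        rw [ih (r.drop (c + 1)) (by simp only [List.length_cons] at hlen; simp [List.length_drop]; omega)
              (i + (c : Int) + 2) (i + (c : Int) + 1) _ (by omega) (by omega) hdrop2]
        rw [List.append_assoc]
        congr 1
        conv_rhs => rw [pvSpans]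
        simp [ht, ← hc]
      · simp only [pvOuter, if_neg hnoskip, if_neg ht]
        have hdrop1 : tokens.drop (i + 1).toNat = r := by
          have h1 : (i + 1).toNat = i.toNat + 1 := by omega
          rw [h1, ← List.drop_drop, hdrop]
          simp
        rw [ih r (by simp only [List.length_cons] at hlen; omega) (i + 1) pe spans (by omega) (by omega) hdrop1]
        conv_rhs => rw [pvSpans]
        simp [ht]

-- A's second phase, run over pvSpans, collapses each run to min(len, num)
theorem pvSplice_eq (rt : String) (num' : Nat) (hnum : 1 ≤ num') :
    ∀ (n : Nat) (xs : List String), xs.length ≤ n → ∀ (i corr : Int) (pre : List String), 0 ≤ corr →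
    i = (pre.length : Int) + corr →
    pvSplice rt (num' : Int) (pvSpans rt i xs) (pre ++ xs) corr
      = pre ++ pvCollapse rt num' xs := by
  intro n
  induction n with
  | zero =>
    intro xs hlen i corr pre _ _
    have : xs = [] := List.eq_nil_of_length_eq_zero (by omega)
    subst this
    simp [pvSpans, pvSplice, pvCollapse]
  | succ n ih =>
    intro xs hlen i corr pre hcorr hi
    cases xs with
    | nil => simp [pvSpans, pvSplice, pvCollapse]
    | cons t r =>
      simp only [List.length_cons] at hlen
      by_cases ht : t = rt
      · rw [pvSpans, if_pos ht]
        set c : Nat := pvCnt rt r with hc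
        rw [pvSplice]
        have hstart : i - corr = (pre.length : Int) := by omega
        have hlen2 : i + (c : Int) + 1 - corr - (i - corr) = ((c : Int) + 1) := by omega
        rw [pvCollapse, if_pos ht, ← hc]
        by_cases hbig : ((c : Int) + 1) > (num' : Int)
        · rw [if_pos (by rw [hlen2]; exact hbig)]
          have htake : PySem.List.slice (pre ++ t :: r) none (some (i - corr)) = pre := by
            rw [hstart, PySem.List.slice_to_natCast, List.take_left]
          have hend : i + (c : Int) + 1 - corr = ((pre.length + (c + 1) : Nat) : Int) := by
            push_cast; omega
          have hdropv : PySem.List.slice (pre ++ t :: r) (some (i + (c : Int) + 1 - corr)) none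
              = (t :: r).drop (c + 1) := by
            rw [hend, PySem.List.slice_from_natCast]
            simp
          rw [htake, hdropv]
          have htoNat : ((num' : Int)).toNat = num' := by omega
          rw [htoNat]
          have hmin : min (c + 1) num' = num' := by omega
          rw [hmin]
          have hrest : (t :: r).drop (c + 1) = r.drop c := rfl
          rw [hrest, hlen2]
          rcases hv : r.drop c with _ | ⟨u, v⟩
          · have hnil1 : r.drop (c + 1) = [] := by
              rw [← List.drop_drop, hv]
              simp
            rw [hnil1]
            simp [pvSpans, pvSplice, pvCollapse]
          · have hu : u ≠ rt := drop_pvCnt_ne rt r u v hv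
            have hv1 : r.drop (c + 1) = v := by
              rw [← List.drop_drop, hv]
              simp
            rw [hv1]
            have hre : pre ++ List.replicate num' rt ++ u :: v
                = (pre ++ List.replicate num' rt ++ [u]) ++ v := by simp
            rw [hre]
            have hvlen : v.length ≤ n := by
              have h1 : (r.drop c).length = v.length + 1 := by rw [hv]; simp
              simp only [List.length_drop] at h1
              omega
            rw [ih v hvlen (i + (c : Int) + 2) (corr + ((c : Int) + 1 - (num' : Int)))
                 (pre ++ List.replicate num' rt ++ [u]) (by omega)
                 (by simp; omega)]
            rw [pvCollapse, if_neg hu]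
            simp
        · rw [if_neg (by rw [hlen2]; exact hbig)]
          have hmin : min (c + 1) num' = c + 1 := by omega
          rw [hmin]
          rcases hv : r.drop c with _ | ⟨u, v⟩
          · have hxs : t :: r = List.replicate (c + 1) rt := by
              have h0 : t :: r = List.replicate (c + 1) rt ++ r.drop c := by
                rw [List.replicate_succ, ht]
                conv_lhs => rw [show r = r.take c ++ r.drop c from (List.take_append_drop c r).symm]
                rw [hc, take_pvCnt, List.cons_append]
              rw [hv] at h0
              simpa using h0
            have hnil1 : r.drop (c + 1) = [] := by
              rw [← List.drop_drop, hv]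
              simp
            rw [hnil1]
            simp only [pvSpans, pvSplice]
            rw [hxs]
            simp [pvCollapse]
          · have hxs : t :: r = List.replicate (c + 1) rt ++ u :: v := by
              have h0 : t :: r = List.replicate (c + 1) rt ++ r.drop c := by
                rw [List.replicate_succ, ht]
                conv_lhs => rw [show r = r.take c ++ r.drop c from (List.take_append_drop c r).symm]
                rw [hc, take_pvCnt, List.cons_append]
              rw [hv] at h0
              exact h0
            have hu : u ≠ rt := drop_pvCnt_ne rt r u v hv
            have hv1 : r.drop (c + 1) = v := by
              rw [← List.drop_drop, hv]
              simp
            rw [hv1]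
            have hre : pre ++ t :: r = (pre ++ List.replicate (c + 1) rt ++ [u]) ++ v := by
              rw [hxs]; simp
            rw [hre]
            have hvlen : v.length ≤ n := by
              have h1 : (r.drop c).length = v.length + 1 := by rw [hv]; simp
              simp only [List.length_drop] at h1
              omega
            rw [ih v hvlen (i + (c : Int) + 2) corr (pre ++ List.replicate (c + 1) rt ++ [u]) hcorr
                 (by simp; omega)]
            rw [pvCollapse, if_neg hu]
            simp
      · rw [pvSpans, if_neg ht, pvCollapse, if_neg ht]
        have hre : pre ++ t :: r = (pre ++ [t]) ++ r := by simp
        rw [hre, ih r (by omega) (i + 1) corr (pre ++ [t]) hcorr (by simp; omega)]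
        simp

-- B over a run of k copies of rt
theorem altGo_run (rt : String) (num : Int) (k : Nat) :
    ∀ (rest : List String) (count : Int), 0 ≤ count →
    altGo rt num (List.replicate k rt ++ rest) count
      = List.replicate (min k (num - count).toNat) rt ++ altGo rt num rest (count + (k : Int)) := by
  induction k with
  | zero => intro rest count _; simp
  | succ k ih =>
    intro rest count hcount
    rw [List.replicate_succ, List.cons_append, altGo, if_pos rfl]
    have harg : count + 1 + (k : Int) = count + ((k + 1 : Nat) : Int) := by push_cast; omega
    by_cases hle : count + 1 ≤ num
    · rw [if_pos hle, ih rest (count + 1) (by omega), harg]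
      have hm : min (k + 1) (num - count).toNat = min k (num - (count + 1)).toNat + 1 := by omega
      rw [hm, List.replicate_succ]
      simp
    · rw [if_neg hle, ih rest (count + 1) (by omega), harg]
      have hm1 : min (k + 1) (num - count).toNat = 0 := by omega
      have hm2 : min k (num - (count + 1)).toNat = 0 := by omega
      rw [hm1, hm2]

-- B computes the run-collapsing specification
theorem altGo_eq (rt : String) (num' : Nat) (hnum : 1 ≤ num') :
    ∀ (n : Nat) (xs : List String), xs.length ≤ n → altGo rt (num' : Int) xs 0 = pvCollapse rt num' xs := by
  intro n
  induction n with
  | zero =>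
    intro xs hlen
    have : xs = [] := List.eq_nil_of_length_eq_zero (by omega)
    subst this
    simp [altGo, pvCollapse]
  | succ n ih =>
    intro xs hlen
    cases xs with
    | nil => simp [altGo, pvCollapse]
    | cons t r =>
      simp only [List.length_cons] at hlen
      by_cases ht : t = rt
      · set c : Nat := pvCnt rt r with hc
        have hxs : t :: r = List.replicate (c + 1) rt ++ r.drop c := by
          rw [List.replicate_succ, ht]
          conv_lhs => rw [show r = r.take c ++ r.drop c from (List.take_append_drop c r).symm]
          rw [hc, take_pvCnt, List.cons_append]
        rw [pvCollapse, if_pos ht, ← hc]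
        conv_lhs => rw [hxs]
        rw [altGo_run rt (num' : Int) (c + 1) (r.drop c) 0 le_rfl]
        have htn : ((num' : Int) - 0).toNat = num' := by omega
        rw [htn]
        congr 1
        rcases hv : r.drop c with _ | ⟨u, v⟩
        · simp [altGo, pvCollapse]
        · have hu : u ≠ rt := drop_pvCnt_ne rt r u v hv
          rw [altGo, if_neg hu, pvCollapse, if_neg hu]
          congr 1
          have hvlen : v.length ≤ n := by
            have h1 : (r.drop c).length = v.length + 1 := by rw [hv]; simp
            simp only [List.length_drop] at h1
            omega
          exact ih v hvlen
      · rw [altGo, if_neg ht, pvCollapse, if_neg ht]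
        congr 1
        exact ih r (by omega)

-- ===== VERDICT (by name: the statement is the Claim_ definition above) =====
theorem clean_repeating_tokens_spec : Claim_equal_clean_repeating_tokens := by
  intro rt tokens _
  unfold Spec_clean_repeating_tokens clean_repeating_tokens clean_repeating_tokens_alt
  set num' : Nat := if rt = "_" ∨ rt = "." then 3 else 1 with hnum'
  have hnum : (if rt = "_" ∨ rt = "." then (3 : Int) else 1) = (num' : Int) := by
    rw [hnum']; split <;> simp
  have h1 : 1 ≤ num' := by rw [hnum']; split <;> omega
  simp only [hnum]
  rw [show PySem.List.enumerate tokens = PySem.List.enumerate tokens 0 from rfl,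
      pvOuter_eq rt tokens tokens.length tokens le_rfl 0 (-1) [] (by omega) (by omega) (by simp)]
  have hsp := pvSplice_eq rt num' h1 tokens.length tokens le_rfl 0 0 [] le_rfl (by simp)
  simp only [List.nil_append] at hsp ⊢
  rw [hsp, altGo_eq rt num' h1 tokens.length tokens le_rfl]
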